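-- pv_equiv track=rewrite | github.com/miguelTavora/Digital-Modulation | codigo/desquantify.py | cria_dicionario
-- ===== SOURCE A (Python) =====
-- def cria_dicionario(indices, valores):
--
-- 	Dict = {}
--
-- 	for a in range(len(indices)):
-- 		if indices[a] in Dict.keys():
-- 			continue
-- 		else:
-- 			Dict[indices[a]] = valores[a]
--
-- 	return Dict
-- ===== SOURCE B (Python) =====
-- def cria_dicionario(indices, valores):
-- 	# Back-to-front: fold each pair onto the pairs collected so far, dropping the
-- 	# later duplicates of its key; no seen-set and no membership test against the
-- 	# dict under construction.  With unique keys left, dict() keeps that order.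
-- 	out = []
-- 	for p in reversed(list(zip(indices, valores))):
-- 		out = [p] + [q for q in out if q[0] != p[0]]
-- 	return dict(out)
-- ===== Notes on version B (the rewrite author's own statement) =====
-- stated objective: alternative
-- what changed: Replaces the forward guard-and-insert loop (membership test against the dict built so far) with a back-to-front fold over the zipped pairs that prepends each pair and filters out later duplicates of its key, building a unique-key pair list that dict() turns into the result.
import Mathlib
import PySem

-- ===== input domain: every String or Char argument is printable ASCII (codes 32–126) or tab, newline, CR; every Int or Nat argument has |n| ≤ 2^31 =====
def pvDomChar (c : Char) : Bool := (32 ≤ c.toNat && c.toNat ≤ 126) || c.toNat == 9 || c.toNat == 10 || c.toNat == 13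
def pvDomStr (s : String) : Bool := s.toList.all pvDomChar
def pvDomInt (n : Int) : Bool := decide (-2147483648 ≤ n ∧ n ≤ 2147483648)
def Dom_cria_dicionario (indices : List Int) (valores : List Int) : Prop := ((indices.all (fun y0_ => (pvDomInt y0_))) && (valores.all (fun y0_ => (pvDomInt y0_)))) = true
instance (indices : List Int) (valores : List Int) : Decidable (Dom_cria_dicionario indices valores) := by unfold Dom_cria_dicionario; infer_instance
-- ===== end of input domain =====

-- B replaces A's forward guard-and-insert loop (membership test against the dict built
-- so far) by a back-to-front fold over the zipped pairs that drops later duplicates of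
-- each key; equal insertion order is proved, not just dict equality.


-- ===== PORT A =====
def cria_dicionario (indices : List Int) (valores : List Int) : List (Int × Int) :=
  ((PySem.List.pyRange 0 (PySem.List.len indices) 1).foldl
    (fun d a =>
      if d.contains (PySem.List.pyGetD indices a 0) then d
      else d.insert (PySem.List.pyGetD indices a 0) (PySem.List.pyGetD valores a 0))
    PySem.Dict.empty).items

-- ===== PORT B =====
-- reversed(list(zip(..))) with 'out = [p] + filter' is the right fold of the pair list.
def cria_dicionario_alt (indices : List Int) (valores : List Int) : List (Int × Int) :=
  (((indices.zip valores).foldr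
      (fun p out => p :: out.filter (fun q => q.1 != p.1)) []).foldl
    (fun d p => d.insert p.1 p.2) PySem.Dict.empty).items

-- ===== PRECONDITION & SPEC =====
-- Pre_ excludes exactly the inputs on which Python A raises IndexError:
-- a first occurrence of a key at a position ≥ len(valores).
def Pre_cria_dicionario (indices : List Int) (valores : List Int) : Prop :=
  ∀ a, a < indices.length → valores.length ≤ a → indices.getD a 0 ∈ indices.take a
instance (indices : List Int) (valores : List Int) : Decidable (Pre_cria_dicionario indices valores) := by unfold Pre_cria_dicionario; infer_instance

def pvWitness_cria_dicionario : List Int × List Int := ([1, 2, 1], [5, 6])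

def Spec_cria_dicionario (indices : List Int) (valores : List Int) (out : List (Int × Int)) : Prop := out = cria_dicionario_alt indices valores
instance (indices : List Int) (valores : List Int) (out : List (Int × Int)) : Decidable (Spec_cria_dicionario indices valores out) := by unfold Spec_cria_dicionario; infer_instance

-- ===== CLAIM (what is proved, stated in full; the proofs are below) =====
def Claim_equal_cria_dicionario : Prop := ∀ (indices : List Int) (valores : List Int), Dom_cria_dicionario indices valores → Pre_cria_dicionario indices valores → Spec_cria_dicionario indices valores (cria_dicionario indices valores)

-- ===== LEMMAS AND PROOFS =====

-- B's inner fold, named for the proofs (definitionally the foldr in cria_dicionario_alt).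
def pvFirsts (L : List (Int × Int)) : List (Int × Int) :=
  L.foldr (fun p out => p :: out.filter (fun q => q.1 != p.1)) []

theorem pvFirsts_cons (x : Int × Int) (M : List (Int × Int)) :
    pvFirsts (x :: M) = x :: (pvFirsts M).filter (fun q => q.1 != x.1) := rfl

theorem pv_map_fst_zip (xs ys : List Int) :
    (xs.zip ys).map Prod.fst = xs.take (min xs.length ys.length) := by
  induction xs generalizing ys with
  | nil => simp
  | cons x xs ih =>
    cases ys with
    | nil => simp
    | cons v vs => simp [List.zip_cons_cons, ih, Nat.succ_min_succ]

theorem pvFirsts_append (L : List (Int × Int)) (p : Int × Int) :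
    pvFirsts (L ++ [p]) = pvFirsts L ++ (if p.1 ∈ L.map Prod.fst then [] else [p]) := by
  induction L with
  | nil => simp [pvFirsts]
  | cons x M ih =>
    rw [List.cons_append, pvFirsts_cons, pvFirsts_cons, ih, List.filter_append]
    by_cases hxm : p.1 ∈ M.map Prod.fst
    · simp [hxm]
    · by_cases hpx : p.1 = x.1
      · simp [hpx]
      · simp [hxm, hpx, bne_iff_ne]

theorem pvFirsts_keys_nodup (L : List (Int × Int)) : ((pvFirsts L).map Prod.fst).Nodup := by
  induction L with
  | nil => simp [pvFirsts]
  | cons x M ih =>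
    rw [pvFirsts_cons, List.map_cons]
    refine List.Nodup.cons ?_ ?_
    · intro hmem
      obtain ⟨q, hq, hqe⟩ := List.mem_map.mp hmem
      have := (List.mem_filter.mp hq).2
      simp [bne_iff_ne] at this
      exact this hqe
    · have hcomm : (((pvFirsts M).filter (fun q => q.1 != x.1)).map Prod.fst)
          = ((pvFirsts M).map Prod.fst).filter (fun k => k != x.1) := by
        rw [List.filter_map]; rfl
      rw [hcomm]
      exact List.Nodup.filter _ ih

-- First-occurrence characterisation: for n < len, index?(xs, xs[n]) = n iff xs[n] ∉ xs.take n.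
theorem pv_index_first (xs : List Int) (n : Nat) (hn : n < xs.length) :
    (PySem.List.index? xs (xs.getD n 0) = some n) ↔ xs.getD n 0 ∉ xs.take n := by
  have hget : xs.getD n 0 = xs[n] := List.getD_eq_getElem xs 0 hn
  constructor
  · intro h hm
    obtain ⟨hk, _, hfirst⟩ := PySem.List.getElem_of_index?_eq_some h
    obtain ⟨j, hj, hje⟩ := List.mem_iff_getElem.mp hm
    have hjn : j < n := by
      have := hj; simp only [List.length_take] at this; omega
    have := hfirst j hjn
    rw [List.getElem_take] at hje
    exact this hje
  · intro hnot
    apply (PySem.List.index?_eq_some_iff xs (xs.getD n 0) n).mpr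
    refine ⟨xs.take n, xs.drop (n + 1), ?_, by simp [Nat.min_eq_left (le_of_lt hn)], hnot⟩
    rw [hget]
    calc xs = xs.take (n + 1) ++ xs.drop (n + 1) := (List.take_append_drop _ _).symm
      _ = xs.take n ++ xs[n] :: xs.drop (n + 1) := by
            rw [List.take_succ_eq_append_getElem hn]; simp

-- A's loop over range(0, n) equals the insert-fold over the first-occurrence positions,
-- and the A-dict's key set is exactly the elements of indices.take n.
theorem pv_inv (indices valores : List Int) (n : Nat) (hn : n ≤ indices.length) :
    ((PySem.List.pyRange 0 (n : Int) 1).foldl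
      (fun d a =>
        if d.contains (PySem.List.pyGetD indices a 0) then d
        else d.insert (PySem.List.pyGetD indices a 0) (PySem.List.pyGetD valores a 0))
      PySem.Dict.empty
      =
      ((PySem.List.pyRange 0 (n : Int) 1).filter
        (fun a => PySem.List.index? indices (PySem.List.pyGetD indices a 0) == some a.toNat)).foldl
        (fun d a => d.insert (PySem.List.pyGetD indices a 0) (PySem.List.pyGetD valores a 0))
        PySem.Dict.empty)
    ∧ ∀ x, ((PySem.List.pyRange 0 (n : Int) 1).foldl
      (fun d a =>
        if d.contains (PySem.List.pyGetD indices a 0) then d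
        else d.insert (PySem.List.pyGetD indices a 0) (PySem.List.pyGetD valores a 0))
      PySem.Dict.empty).contains x = true ↔ x ∈ indices.take n := by
  induction n with
  | zero => simp [PySem.List.pyRange]
  | succ m ih =>
    have hm : m ≤ indices.length := Nat.le_of_succ_le hn
    obtain ⟨heq, hkeys⟩ := ih hm
    have hsplit : PySem.List.pyRange 0 ((m : Int) + 1) 1
        = PySem.List.pyRange 0 (m : Int) 1 ++ [(m : Int)] :=
      PySem.List.pyRange_one_succ_right (by positivity)
    have hml : m < indices.length := hn
    have hgetm : PySem.List.pyGetD indices (m : Int) 0 = indices.getD m 0 :=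
      PySem.List.pyGetD_natCast indices m 0
    have htake : indices.take (m + 1) = indices.take m ++ [indices.getD m 0] := by
      rw [List.getD_eq_getElem indices 0 hml]
      exact List.take_succ_eq_append_getElem hml
    push_cast
    rw [hsplit, List.filter_append, List.foldl_append, List.foldl_append, ← heq]
    by_cases hmem : indices.getD m 0 ∈ indices.take m
    · have hcont : ((PySem.List.pyRange 0 (m : Int) 1).foldl
          (fun d a =>
            if d.contains (PySem.List.pyGetD indices a 0) then d
            else d.insert (PySem.List.pyGetD indices a 0) (PySem.List.pyGetD valores a 0))
          PySem.Dict.empty).contains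
          (PySem.List.pyGetD indices (m : Int) 0) = true := by
        rw [hgetm]; exact (hkeys _).mpr hmem
      have hfilt : (PySem.List.index? indices (PySem.List.pyGetD indices (m : Int) 0)
            == some ((m : Int)).toNat) = false := by
        rw [hgetm]
        simp only [Int.toNat_natCast, beq_eq_false_iff_ne, ne_eq]
        rw [pv_index_first indices m hml]
        exact not_not_intro hmem
      constructor
      · simp only [List.filter_cons, hfilt, Bool.false_eq_true, if_false, List.filter_nil, List.foldl_cons,
          List.foldl_nil]
        rw [if_pos hcont]
      · intro x
        simp only [List.foldl_cons, List.foldl_nil, hcont, if_pos, htake, List.mem_append,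
          List.mem_singleton]
        rw [hkeys x]
        constructor
        · exact Or.inl
        · rintro (h | h)
          · exact h
          · rwa [h]
    · have hcont : ((PySem.List.pyRange 0 (m : Int) 1).foldl
          (fun d a =>
            if d.contains (PySem.List.pyGetD indices a 0) then d
            else d.insert (PySem.List.pyGetD indices a 0) (PySem.List.pyGetD valores a 0))
          PySem.Dict.empty).contains
          (PySem.List.pyGetD indices (m : Int) 0) = false := by
        rw [hgetm]
        rw [Bool.eq_false_iff]
        intro h; exact hmem ((hkeys _).mp h)
      have hfilt : (PySem.List.index? indices (PySem.List.pyGetD indices (m : Int) 0)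
            == some ((m : Int)).toNat) = true := by
        rw [hgetm]
        simp only [Int.toNat_natCast, beq_iff_eq]
        exact (pv_index_first indices m hml).mpr hmem
      constructor
      · simp only [List.filter_cons, hfilt]
        rw [if_pos trivial]
        simp only [List.filter_nil, List.foldl_cons, List.foldl_nil]
        rw [if_neg (ne_true_of_eq_false hcont)]
      · intro x
        simp only [List.foldl_cons, List.foldl_nil, hcont, Bool.false_eq_true, if_false]
        rw [PySem.Dict.contains_insert]
        simp only [Bool.or_eq_true, beq_iff_eq, hkeys x, htake, List.mem_append,
          List.mem_singleton, hgetm]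
        tauto

-- Under Pre_, the pairs at the first-occurrence positions of range(0, n) are exactly
-- pvFirsts of the first n zipped pairs.
theorem pv_map_filter (indices valores : List Int)
    (hpre : Pre_cria_dicionario indices valores) (n : Nat) (hn : n ≤ indices.length) :
    ((PySem.List.pyRange 0 (n : Int) 1).filter
        (fun a => PySem.List.index? indices (PySem.List.pyGetD indices a 0) == some a.toNat)).map
      (fun a => (PySem.List.pyGetD indices a 0, PySem.List.pyGetD valores a 0))
    = pvFirsts ((indices.zip valores).take n) := by
  induction n with
  | zero => simp [PySem.List.pyRange, pvFirsts]
  | succ m ih =>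
    have hm : m ≤ indices.length := Nat.le_of_succ_le hn
    have hml : m < indices.length := hn
    have hsplit : PySem.List.pyRange 0 ((m : Int) + 1) 1
        = PySem.List.pyRange 0 (m : Int) 1 ++ [(m : Int)] :=
      PySem.List.pyRange_one_succ_right (by positivity)
    have hgetm : PySem.List.pyGetD indices (m : Int) 0 = indices.getD m 0 :=
      PySem.List.pyGetD_natCast indices m 0
    have hget : indices.getD m 0 = indices[m] := List.getD_eq_getElem indices 0 hml
    push_cast
    rw [hsplit, List.filter_append, List.map_append, ih hm]
    by_cases hv : m < valores.length
    · -- the pair (indices[m], valores[m]) exists in the zip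
      have hzlen : m < (indices.zip valores).length := by simp [List.length_zip]; omega
      have htake : (indices.zip valores).take (m + 1)
          = (indices.zip valores).take m ++ [(indices.zip valores)[m]] :=
        List.take_succ_eq_append_getElem hzlen
      have hz : (indices.zip valores)[m] = (indices[m], valores[m]) := List.getElem_zip
      have hgetv : PySem.List.pyGetD valores (m : Int) 0 = valores.getD m 0 :=
        PySem.List.pyGetD_natCast valores m 0
      have hkeys : ((indices.zip valores).take m).map Prod.fst = indices.take m := by
        rw [List.map_take, pv_map_fst_zip, List.take_take]
        congr 1; omega
      have hcond : ((indices.zip valores)[m].1 ∈ ((indices.zip valores).take m).map Prod.fst)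
          ↔ indices.getD m 0 ∈ indices.take m := by
        rw [hz, hkeys, hget]
      rw [htake, pvFirsts_append]
      by_cases hmem : indices.getD m 0 ∈ indices.take m
      · have hfilt : (PySem.List.index? indices (PySem.List.pyGetD indices (m : Int) 0)
              == some ((m : Int)).toNat) = false := by
          rw [hgetm]
          simp only [Int.toNat_natCast, beq_eq_false_iff_ne, ne_eq]
          rw [pv_index_first indices m hml]
          exact not_not_intro hmem
        rw [if_pos (hcond.mpr hmem)]
        simp only [List.filter_cons, hfilt, Bool.false_eq_true, if_false, List.filter_nil,
          List.map_nil, List.append_nil]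
      · have hfilt : (PySem.List.index? indices (PySem.List.pyGetD indices (m : Int) 0)
              == some ((m : Int)).toNat) = true := by
          rw [hgetm]
          simp only [Int.toNat_natCast, beq_iff_eq]
          exact (pv_index_first indices m hml).mpr hmem
        rw [if_neg (fun h => hmem (hcond.mp h))]
        simp only [List.filter_cons, hfilt, if_pos, List.filter_nil, List.map_cons, List.map_nil]
        rw [hz, hgetm, hgetv, hget, List.getD_eq_getElem valores 0 hv]
    · -- m ≥ len valores: Pre_ says position m is a duplicate, and the zip is saturated
      have hmem : indices.getD m 0 ∈ indices.take m := hpre m hml (Nat.le_of_not_lt hv)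
      have hfilt : (PySem.List.index? indices (PySem.List.pyGetD indices (m : Int) 0)
            == some ((m : Int)).toNat) = false := by
        rw [hgetm]
        simp only [Int.toNat_natCast, beq_eq_false_iff_ne, ne_eq]
        rw [pv_index_first indices m hml]
        exact not_not_intro hmem
      have hzlen : (indices.zip valores).length ≤ m := by
        simp [List.length_zip]; omega
      have htake : (indices.zip valores).take (m + 1) = (indices.zip valores).take m := by
        rw [List.take_of_length_le hzlen, List.take_of_length_le (Nat.le_succ_of_le hzlen)]
      rw [htake]
      simp only [List.filter_cons, hfilt, Bool.false_eq_true, if_false, List.filter_nil,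
        List.map_nil, List.append_nil]

-- ===== VERDICT (by name: the statement is the Claim_ definition above) =====
theorem cria_dicionario_spec : Claim_equal_cria_dicionario := by
  intro indices valores _ hpre
  unfold Spec_cria_dicionario cria_dicionario cria_dicionario_alt
  have heq := (pv_inv indices valores indices.length le_rfl).1
  have hmap := pv_map_filter indices valores hpre indices.length le_rfl
  rw [List.take_of_length_le (by simp [List.length_zip])] at hmap
  simp only [PySem.List.len]
  rw [heq]
  have hfresh : ∀ a ∈ ((PySem.List.pyRange 0 (indices.length : Int) 1).filter
      (fun a => PySem.List.index? indices (PySem.List.pyGetD indices a 0) == some a.toNat)),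
      (PySem.Dict.empty : PySem.Dict Int Int).contains (PySem.List.pyGetD indices a 0) = false := by
    intro a _; exact PySem.Dict.contains_empty _
  have hnodupA : (((PySem.List.pyRange 0 (indices.length : Int) 1).filter
      (fun a => PySem.List.index? indices (PySem.List.pyGetD indices a 0) == some a.toNat)).map
      (fun a => PySem.List.pyGetD indices a 0)).Nodup := by
    have hmm : ((PySem.List.pyRange 0 (indices.length : Int) 1).filter
        (fun a => PySem.List.index? indices (PySem.List.pyGetD indices a 0) == some a.toNat)).map
        (fun a => PySem.List.pyGetD indices a 0)
        = (((PySem.List.pyRange 0 (indices.length : Int) 1).filter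
        (fun a => PySem.List.index? indices (PySem.List.pyGetD indices a 0) == some a.toNat)).map
        (fun a => (PySem.List.pyGetD indices a 0, PySem.List.pyGetD valores a 0))).map Prod.fst := by
      rw [List.map_map]; rfl
    rw [hmm, hmap]
    exact pvFirsts_keys_nodup _
  rw [PySem.Dict.items_foldl_insert_fresh
    ((PySem.List.pyRange 0 (indices.length : Int) 1).filter
      (fun a => PySem.List.index? indices (PySem.List.pyGetD indices a 0) == some a.toNat))
    (fun a => PySem.List.pyGetD indices a 0) (fun a => PySem.List.pyGetD valores a 0)
    PySem.Dict.empty hfresh hnodupA]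
  have hnodupB : ((pvFirsts (indices.zip valores)).map (fun p : Int × Int => p.1)).Nodup :=
    pvFirsts_keys_nodup _
  have hfreshB : ∀ p ∈ pvFirsts (indices.zip valores),
      (PySem.Dict.empty : PySem.Dict Int Int).contains p.1 = false := by
    intro p _; exact PySem.Dict.contains_empty _
  rw [show ((indices.zip valores).foldr
      (fun p out => p :: out.filter (fun q => q.1 != p.1)) ([] : List (Int × Int)))
      = pvFirsts (indices.zip valores) from rfl]
  rw [PySem.Dict.items_foldl_insert_fresh (pvFirsts (indices.zip valores))
    (fun p => p.1) (fun p => p.2) PySem.Dict.empty hfreshB hnodupB]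
  rw [show (PySem.Dict.empty : PySem.Dict Int Int).items = [] from rfl]
  simp only [List.nil_append]
  rw [hmap]
  simp
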